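-- pv_equiv track=rewrite | github.com/pirogoeth/advent-of-code | 2025/day2/part2.py | generate_potential_repetition_sequences
-- ===== SOURCE A (Python) =====
-- from typing import Iterator, List, Set
--
-- def generate_potential_repetition_sequences(haystack: str) -> List[str]:
--     """ We're searching for IDs that consist of at least two or more sequences
--         of repetitions, so use a sliding window starting at len(num_str)/2 to generate
--         the potential repetition sequences
--
--         Returns the sequences set as a list in reverse order to reduce the amount of matching
--         needed
--     """
--
--     sequences: Set[str] = set()
--
--     split_size = 2
--     while (idx := int(len(haystack) / split_size)) >= 1:
--         needle = haystack[:idx]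
--         sequences.add(needle)
--         if len(needle) == 1:
--             break
--
--         split_size += 1
--
--     return sorted(list(sequences), reverse=True)
-- ===== SOURCE B (Python) =====
-- def generate_potential_repetition_sequences(haystack: str) -> list:
--     """Enumerate only the distinct quotient lengths len(haystack)//k (k >= 2)
--     by jumping over quotient blocks (k -> n // (n // k) + 1), emitting each
--     prefix directly.  The lengths are strictly decreasing, so the prefixes come
--     out already in reverse-sorted order: no set and no sort needed.
--     """
--     n = len(haystack)
--     result = []
--     k = 2
--     while k <= n:
--         q = n // k
--         result.append(haystack[:q])
--         k = n // q + 1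
--     return result
-- ===== Notes on version B (the rewrite author's own statement) =====
-- stated objective: faster
-- what changed: B replaces A's split_size-by-one while loop over a set plus a final reverse sort by quotient-block enumeration (k -> n//(n//k)+1) that visits only the O(sqrt(n)) distinct quotient lengths and emits each prefix once, already in reverse-sorted order, so the set and the sort disappear.
import Mathlib
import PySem

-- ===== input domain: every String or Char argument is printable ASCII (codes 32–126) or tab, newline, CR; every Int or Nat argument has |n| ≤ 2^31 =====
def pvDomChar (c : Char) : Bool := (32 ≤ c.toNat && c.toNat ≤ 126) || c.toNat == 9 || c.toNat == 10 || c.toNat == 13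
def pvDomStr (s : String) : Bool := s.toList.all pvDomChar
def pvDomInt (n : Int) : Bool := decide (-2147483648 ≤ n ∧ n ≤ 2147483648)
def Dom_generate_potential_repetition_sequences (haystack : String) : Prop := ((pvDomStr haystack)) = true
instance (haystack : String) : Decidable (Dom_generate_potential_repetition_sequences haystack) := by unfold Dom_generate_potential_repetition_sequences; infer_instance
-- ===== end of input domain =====

-- B replaces A's one-split_size-at-a-time loop + set + sort by quotient-block jumps that emit each
-- distinct prefix once, already in reverse-sorted order (no set, no sort, O(√n) loop iterations).

-- ===== PORT A =====
-- A's while loop: split_size is `k`, `s` is the `sequences` set built so far.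
-- `int(len(haystack) / split_size)` is ported as Nat floor division: exact, since for
-- lengths < 2^52 CPython's float quotient truncates to exactly len // split_size.
def pvLoopA (haystack : String) (k : Nat) (s : PySem.Set String) : PySem.Set String :=
  let idx := haystack.toList.length / k
  if h : 1 ≤ idx then
    let needle := PySem.Str.slice haystack none (some (idx : Int))
    let s' := PySem.Set.add s needle
    if PySem.Str.len needle = 1 then s' else pvLoopA haystack (k + 1) s'
  else s
termination_by haystack.toList.length + 1 - k
decreasing_by
  have hk : k ≤ haystack.toList.length := by
    by_contra hgt
    have : haystack.toList.length / k = 0 := Nat.div_eq_of_lt (by omega)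
    omega
  omega

def generate_potential_repetition_sequences (haystack : String) : List String :=
  PySem.List.sorted (pvLoopA haystack 2 PySem.Set.empty) (fun x => x) true

-- ===== PORT B =====
-- B's while loop: emits haystack[:n//k] and jumps k to n // (n//k) + 1.
def pvJumpB (haystack : String) (k : Nat) : List String :=
  if h : k ≤ haystack.toList.length then
    let n := haystack.toList.length
    let q := n / k
    PySem.Str.slice haystack none (some (q : Int)) :: pvJumpB haystack (n / q + 1)
  else []
termination_by haystack.toList.length + 1 - k
decreasing_by
  rcases Nat.eq_zero_or_pos k with hk0 | hk1
  · subst hk0; simp only [Nat.div_zero]; omega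
  · have hq : 1 ≤ haystack.toList.length / k := (Nat.one_le_div_iff hk1).mpr h
    have hkq : k * (haystack.toList.length / k) ≤ haystack.toList.length := by
      calc k * (haystack.toList.length / k) = haystack.toList.length / k * k := Nat.mul_comm _ _
        _ ≤ haystack.toList.length := Nat.div_mul_le_self _ _
    have : k ≤ haystack.toList.length / (haystack.toList.length / k) :=
      (Nat.le_div_iff_mul_le hq).mpr hkq
    omega

def generate_potential_repetition_sequences_alt (haystack : String) : List String :=
  pvJumpB haystack 2

-- ===== PRECONDITION & SPEC =====
def Spec_generate_potential_repetition_sequences (haystack : String) (out : List String) : Prop := out = generate_potential_repetition_sequences_alt haystack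
instance (haystack : String) (out : List String) : Decidable (Spec_generate_potential_repetition_sequences haystack out) := by unfold Spec_generate_potential_repetition_sequences; infer_instance

-- ===== CLAIM (what is proved, stated in full; the proofs are below) =====
def Claim_equal_generate_potential_repetition_sequences : Prop := ∀ (haystack : String), Dom_generate_potential_repetition_sequences haystack → Spec_generate_potential_repetition_sequences haystack (generate_potential_repetition_sequences haystack)

-- ===== LEMMAS AND PROOFS =====

-- the prefix haystack[:m]
def pvPre (haystack : String) (m : Nat) : String :=
  PySem.Str.slice haystack none (some (m : Int))

lemma pvPre_toList (haystack : String) (m : Nat) :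
    (pvPre haystack m).toList = haystack.toList.take m := by
  simp [pvPre, PySem.Str.slice, PySem.List.slice_to_natCast]

lemma pvPre_len (haystack : String) (m : Nat) (h : m ≤ haystack.toList.length) :
    PySem.Str.len (pvPre haystack m) = (m : Int) := by
  rw [PySem.Str.len_eq, pvPre_toList, List.length_take]
  congr 1
  omega

lemma pv_lex_append (l t : List Char) (h : t ≠ []) : List.Lex (· < ·) l (l ++ t) := by
  induction l with
  | nil => cases t with
    | nil => simp at h
    | cons x xs => exact List.Lex.nil
  | cons x xs ih => exact List.Lex.cons ih

-- a proper prefix is lexicographically smaller (Python string <)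
lemma pvPre_lt (haystack : String) (a b : Nat) (hab : a < b) (hb : b ≤ haystack.toList.length) :
    pvPre haystack a < pvPre haystack b := by
  rw [String.lt_iff_toList_lt, pvPre_toList, pvPre_toList]
  have h2 : (haystack.toList.take b).drop a ≠ [] := by
    have hlen : ((haystack.toList.take b).drop a).length = b - a := by
      rw [List.length_drop, List.length_take]
      omega
    intro hnil
    rw [hnil] at hlen
    simp at hlen
    omega
  have h1 : haystack.toList.take b = haystack.toList.take a ++ (haystack.toList.take b).drop a := by
    conv_lhs => rw [← List.take_append_drop a (haystack.toList.take b)]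
    rw [List.take_take, min_eq_left hab.le]
  rw [h1]
  exact pv_lex_append _ _ h2

lemma pvPre_ne (haystack : String) (a b : Nat) (hab : a < b) (hb : b ≤ haystack.toList.length) :
    pvPre haystack a ≠ pvPre haystack b :=
  ne_of_lt (pvPre_lt haystack a b hab hb)

-- quotients are constant on a block: k ≤ j ≤ n/(n/k) → n/j = n/k
lemma pv_quot_const (n k j : Nat) (hk : 1 ≤ k) (hkj : k ≤ j) (hj : j ≤ n / (n / k)) :
    n / j = n / k := by
  have hq1 : 1 ≤ n / k := by
    by_contra h
    have h0 : n / k = 0 := Nat.lt_one_iff.mp (not_le.mp h)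
    have h1 : n / (n / k) = 0 := by rw [h0]; simp
    omega
  apply Nat.le_antisymm
  · exact Nat.div_le_div_left hkj hk
  · have hmul : (n / k) * j ≤ n := by
      calc (n / k) * j = j * (n / k) := Nat.mul_comm _ _
        _ ≤ (n / (n / k)) * (n / k) := Nat.mul_le_mul_right _ hj
        _ ≤ n := Nat.div_mul_le_self _ _
    exact (Nat.le_div_iff_mul_le (by omega)).mpr hmul

-- k stays ≤ n/(n/k) (the end of its own quotient block)
lemma pv_le_block_end (n k : Nat) (hk : 1 ≤ k) (hkn : k ≤ n) : k ≤ n / (n / k) := by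
  have hq : 1 ≤ n / k := (Nat.one_le_div_iff hk).mpr hkn
  have hkq : (n / k) * k ≤ n := Nat.div_mul_le_self _ _
  exact (Nat.le_div_iff_mul_le hq).mpr (by rw [Nat.mul_comm]; exact hkq)

-- past the block end the quotient strictly drops
lemma pv_quot_drop (n q : Nat) (hq : 1 ≤ q) : n / (n / q + 1) < q := by
  have h1 : n < q * (n / q + 1) := by
    have h2 := Nat.div_add_mod n q
    have h3 : n % q < q := Nat.mod_lt _ (by omega)
    have h4 : q * (n / q + 1) = q * (n / q) + q := by ring
    omega
  exact (Nat.div_lt_iff_lt_mul (Nat.succ_pos _)).mpr h1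

-- adding an already-present element changes nothing
lemma pvSet_add_mem {s : PySem.Set String} {x : String} (h : x ∈ s) :
    PySem.Set.add s x = s := by
  simp [PySem.Set.add, PySem.Set.contains, h]

-- adding a fresh element appends it
lemma pvSet_add_not_mem {s : PySem.Set String} {x : String} (h : x ∉ s) :
    PySem.Set.add s x = s ++ [x] := by
  simp [PySem.Set.add, PySem.Set.contains, h]

-- one step of A's loop inside a quotient block with the needle already present does nothing
lemma pvLoopA_step (haystack : String) (q j : Nat) (s : PySem.Set String) (hq2 : 2 ≤ q)
    (hjq : haystack.toList.length / j = q)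
    (hmem : pvPre haystack q ∈ s) :
    pvLoopA haystack j s = pvLoopA haystack (j + 1) s := by
  have hq1 : 1 ≤ haystack.toList.length / j := by omega
  have hqn : q ≤ haystack.toList.length := hjq ▸ Nat.div_le_self _ _
  have hlen : PySem.Str.len (PySem.Str.slice haystack none (some ((haystack.toList.length / j : Nat) : Int))) = (q : Int) := by
    rw [hjq]
    exact pvPre_len haystack q hqn
  have hne1 : ¬ PySem.Str.len (PySem.Str.slice haystack none (some ((haystack.toList.length / j : Nat) : Int))) = 1 := by
    rw [hlen]
    intro hc
    have : q = 1 := by exact_mod_cast hc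
    omega
  rw [pvLoopA]
  simp only [hq1, dif_pos, hne1, if_false]
  congr 1
  have : PySem.Str.slice haystack none (some ((haystack.toList.length / j : Nat) : Int)) = pvPre haystack q := by
    rw [hjq]; rfl
  rw [this]
  exact pvSet_add_mem hmem

-- within one quotient block, A's loop only re-adds the member needle: nothing changes
lemma pvLoopA_skip (haystack : String) (q : Nat) (hq2 : 2 ≤ q) :
    ∀ d j s, haystack.toList.length / q - j ≤ d →
      haystack.toList.length / j = q → j ≤ haystack.toList.length / q →
      pvPre haystack q ∈ s →
      pvLoopA haystack j s = pvLoopA haystack (haystack.toList.length / q + 1) s := by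
  intro d
  induction d with
  | zero =>
    intro j s hd hjq hjle hmem
    have hj : j = haystack.toList.length / q := by omega
    rw [pvLoopA_step haystack q j s hq2 hjq hmem, hj]
  | succ d ih =>
    intro j s hd hjq hjle hmem
    rw [pvLoopA_step haystack q j s hq2 hjq hmem]
    by_cases hend : j = haystack.toList.length / q
    · rw [hend]
    · have hj1 : j + 1 ≤ haystack.toList.length / q := by omega
      have hjpos : 1 ≤ j := by
        by_contra hc
        have hj0 : j = 0 := by omega
        rw [hj0, Nat.div_zero] at hjq
        omega
      have hjq1 : haystack.toList.length / (j + 1) = q := by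
        have h := pv_quot_const haystack.toList.length j (j + 1) hjpos (by omega)
          (by rw [hjq]; exact hj1)
        rw [h, hjq]
      exact ih (j + 1) s (by omega) hjq1 hj1 hmem

-- A's loop and B's loop both stop past n
lemma pvLoopA_past (haystack : String) (k : Nat) (s : PySem.Set String)
    (h : haystack.toList.length < k) : pvLoopA haystack k s = s := by
  have h0 : haystack.toList.length / k = 0 := Nat.div_eq_of_lt h
  rw [pvLoopA]
  simp only [h0]
  norm_num

lemma pvJumpB_past (haystack : String) (k : Nat)
    (h : haystack.toList.length < k) : pvJumpB haystack k = [] := by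
  rw [pvJumpB, dif_neg (Nat.not_le.mpr h)]

-- main alignment: from any split_size k ≥ 2, A's loop appends exactly B's jump list,
-- provided no prefix of length ≤ n/k is already in the set
lemma pvLoopA_eq_jump (haystack : String) :
    ∀ d k s, haystack.toList.length + 1 - k ≤ d → 2 ≤ k →
      (∀ m, 1 ≤ m → m ≤ haystack.toList.length / k → pvPre haystack m ∉ s) →
      pvLoopA haystack k s = s ++ pvJumpB haystack k := by
  intro d
  induction d with
  | zero =>
    intro k s hd hk hfresh
    have hkn : haystack.toList.length < k := by omega
    rw [pvLoopA_past _ _ _ hkn, pvJumpB_past _ _ hkn, List.append_nil]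
  | succ d ih =>
    intro k s hd hk hfresh
    by_cases hkn : k ≤ haystack.toList.length
    · have hq1 : 1 ≤ haystack.toList.length / k := (Nat.one_le_div_iff (by omega)).mpr hkn
      have hqn : haystack.toList.length / k ≤ haystack.toList.length := Nat.div_le_self _ _
      have hfreshq : pvPre haystack (haystack.toList.length / k) ∉ s :=
        hfresh _ hq1 (le_refl _)
      rw [pvLoopA]
      simp only [hq1, dif_pos]
      by_cases hqone : haystack.toList.length / k = 1
      · have hlen1 : PySem.Str.len (PySem.Str.slice haystack none (some ((haystack.toList.length / k : Nat) : Int))) = 1 := by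
          rw [hqone]
          exact pvPre_len haystack 1 (by omega)
        rw [if_pos hlen1]
        rw [show PySem.Str.slice haystack none (some ((haystack.toList.length / k : Nat) : Int)) = pvPre haystack (haystack.toList.length / k) from rfl]
        rw [pvSet_add_not_mem hfreshq]
        conv_rhs => rw [pvJumpB]
        simp only [hkn, dif_pos]
        rw [show PySem.Str.slice haystack none (some ((haystack.toList.length / k : Nat) : Int)) = pvPre haystack (haystack.toList.length / k) from rfl]
        have hjump_nil : pvJumpB haystack (haystack.toList.length / (haystack.toList.length / k) + 1) = [] := by
          apply pvJumpB_past
          rw [hqone, Nat.div_one]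
          omega
        rw [hjump_nil]
      · have hq2 : 2 ≤ haystack.toList.length / k := by omega
        have hlen_ne : ¬ PySem.Str.len (PySem.Str.slice haystack none (some ((haystack.toList.length / k : Nat) : Int))) = 1 := by
          rw [show PySem.Str.slice haystack none (some ((haystack.toList.length / k : Nat) : Int)) = pvPre haystack (haystack.toList.length / k) from rfl,
            pvPre_len haystack _ hqn]
          intro hc
          have : haystack.toList.length / k = 1 := by exact_mod_cast hc
          omega
        rw [if_neg hlen_ne]
        rw [show PySem.Str.slice haystack none (some ((haystack.toList.length / k : Nat) : Int)) = pvPre haystack (haystack.toList.length / k) from rfl]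
        rw [pvSet_add_not_mem hfreshq]
        have hkblock : k ≤ haystack.toList.length / (haystack.toList.length / k) :=
          pv_le_block_end haystack.toList.length k (by omega) hkn
        have hmem' : pvPre haystack (haystack.toList.length / k) ∈ s ++ [pvPre haystack (haystack.toList.length / k)] := by
          simp
        have hskip : pvLoopA haystack (k + 1) (s ++ [pvPre haystack (haystack.toList.length / k)]) =
            pvLoopA haystack (haystack.toList.length / (haystack.toList.length / k) + 1) (s ++ [pvPre haystack (haystack.toList.length / k)]) := by
          by_cases hko : k + 1 ≤ haystack.toList.length / (haystack.toList.length / k)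
          · have hjq1 : haystack.toList.length / (k + 1) = haystack.toList.length / k :=
              pv_quot_const haystack.toList.length k (k + 1) (by omega) (by omega) hko
            exact pvLoopA_skip haystack (haystack.toList.length / k) hq2
              (haystack.toList.length / (haystack.toList.length / k)) (k + 1) _
              (by omega) hjq1 hko hmem'
          · have hke : k + 1 = haystack.toList.length / (haystack.toList.length / k) + 1 := by omega
            rw [hke]
        rw [hskip]
        have hdrop : haystack.toList.length / (haystack.toList.length / (haystack.toList.length / k) + 1) < haystack.toList.length / k :=
          pv_quot_drop haystack.toList.length (haystack.toList.length / k) hq1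
        have ihres := ih (haystack.toList.length / (haystack.toList.length / k) + 1)
          (s ++ [pvPre haystack (haystack.toList.length / k)])
          (by omega) (by omega)
          (by
            intro m hm1 hmle hmemm
            have hmq : m < haystack.toList.length / k := lt_of_le_of_lt hmle hdrop
            rcases List.mem_append.mp hmemm with hin | hin
            · exact hfresh m hm1 (by omega) hin
            · have hne := pvPre_ne haystack m (haystack.toList.length / k) hmq hqn
              simp only [List.mem_singleton] at hin
              exact hne hin)
        rw [ihres]
        conv_rhs => rw [pvJumpB]
        simp only [hkn, dif_pos]
        rw [show PySem.Str.slice haystack none (some ((haystack.toList.length / k : Nat) : Int)) = pvPre haystack (haystack.toList.length / k) from rfl]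
        simp [List.append_assoc]
    · have hkn' : haystack.toList.length < k := by omega
      rw [pvLoopA_past _ _ _ hkn', pvJumpB_past _ _ hkn', List.append_nil]

-- every element of B's list is a short prefix
lemma pvJumpB_mem (haystack : String) :
    ∀ d k, haystack.toList.length + 1 - k ≤ d → 1 ≤ k →
      ∀ x ∈ pvJumpB haystack k,
        ∃ m, 1 ≤ m ∧ m ≤ haystack.toList.length / k ∧ x = pvPre haystack m := by
  intro d
  induction d with
  | zero =>
    intro k hd hk x hx
    have hkn : haystack.toList.length < k := by omega
    rw [pvJumpB_past _ _ hkn] at hx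
    simp at hx
  | succ d ih =>
    intro k hd hk x hx
    by_cases hkn : k ≤ haystack.toList.length
    · have hq1 : 1 ≤ haystack.toList.length / k := (Nat.one_le_div_iff (by omega)).mpr hkn
      rw [pvJumpB] at hx
      simp only [hkn, dif_pos, List.mem_cons] at hx
      rcases hx with hx | hx
      · exact ⟨haystack.toList.length / k, hq1, le_refl _, hx⟩
      · have hkblock : k ≤ haystack.toList.length / (haystack.toList.length / k) :=
          pv_le_block_end haystack.toList.length k (by omega) hkn
        obtain ⟨m, hm1, hmle, hmx⟩ := ih (haystack.toList.length / (haystack.toList.length / k) + 1)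
          (by omega) (by omega) x hx
        have hdrop : haystack.toList.length / (haystack.toList.length / (haystack.toList.length / k) + 1) < haystack.toList.length / k :=
          pv_quot_drop haystack.toList.length (haystack.toList.length / k) hq1
        exact ⟨m, hm1, by omega, hmx⟩
    · have hkn' : haystack.toList.length < k := by omega
      rw [pvJumpB_past _ _ hkn'] at hx
      simp at hx

-- B's list is strictly decreasing
lemma pvJumpB_pairwise (haystack : String) :
    ∀ d k, haystack.toList.length + 1 - k ≤ d → 2 ≤ k →
      (pvJumpB haystack k).Pairwise (fun a b => b < a) := by
  intro d
  induction d with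
  | zero =>
    intro k hd hk
    have hkn : haystack.toList.length < k := by omega
    rw [pvJumpB_past _ _ hkn]
    exact List.Pairwise.nil
  | succ d ih =>
    intro k hd hk
    by_cases hkn : k ≤ haystack.toList.length
    · have hq1 : 1 ≤ haystack.toList.length / k := (Nat.one_le_div_iff (by omega)).mpr hkn
      have hqn : haystack.toList.length / k ≤ haystack.toList.length := Nat.div_le_self _ _
      have hkblock : k ≤ haystack.toList.length / (haystack.toList.length / k) :=
        pv_le_block_end haystack.toList.length k (by omega) hkn
      have hdrop : haystack.toList.length / (haystack.toList.length / (haystack.toList.length / k) + 1) < haystack.toList.length / k :=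
        pv_quot_drop haystack.toList.length (haystack.toList.length / k) hq1
      rw [pvJumpB]
      simp only [hkn, dif_pos]
      refine List.Pairwise.cons ?_ (ih (haystack.toList.length / (haystack.toList.length / k) + 1) (by omega) (by omega))
      intro x hx
      obtain ⟨m, hm1, hmle, hmx⟩ := pvJumpB_mem haystack (haystack.toList.length + 1)
        (haystack.toList.length / (haystack.toList.length / k) + 1) (by omega) (by omega) x hx
      rw [hmx,
        show PySem.Str.slice haystack none (some ((haystack.toList.length / k : Nat) : Int)) = pvPre haystack (haystack.toList.length / k) from rfl]
      exact pvPre_lt haystack m (haystack.toList.length / k) (by omega) hqn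
    · have hkn' : haystack.toList.length < k := by omega
      rw [pvJumpB_past _ _ hkn']
      exact List.Pairwise.nil

-- ===== VERDICT (by name: the statement is the Claim_ definition above) =====
theorem generate_potential_repetition_sequences_spec : Claim_equal_generate_potential_repetition_sequences := by
  intro haystack _
  unfold Spec_generate_potential_repetition_sequences
  unfold generate_potential_repetition_sequences generate_potential_repetition_sequences_alt
  have h := pvLoopA_eq_jump haystack (haystack.toList.length + 1) 2 PySem.Set.empty
    (by omega) (le_refl 2)
    (by intro m _ _ hmem; simp [PySem.Set.empty] at hmem)
  rw [h]
  simp only [PySem.Set.empty, List.nil_append]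
  exact PySem.List.sorted_rev_eq_of_perm_of_pairwise_gt _ _ _ (List.Perm.refl _)
    (pvJumpB_pairwise haystack (haystack.toList.length + 1) 2 (by omega) (le_refl 2))
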